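-- pv_equiv track=rewrite | github.com/tardyp/buildbot_pipelines | buildbot_pipelines/yaml_loader.py | compute_matrix
-- ===== SOURCE A (Python) =====
-- def compute_matrix(matrix, matrix_include=None, matrix_exclude=None):
--     if not matrix and not matrix_include:
--         return [{}]  # if matrix is not used, we run this stage within on build without particular property
--     matrix_list = []
--     for k, vs in matrix.items():
--         if matrix_list:
--             next_matrix_list = []
--             for matrix_item in matrix_list:
--                 for v in vs:
--                     _matrix_item = matrix_item.copy()
--                     _matrix_item[k] = v
--                     next_matrix_list.append(_matrix_item)
--             matrix_list = next_matrix_list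
--         else:
--             matrix_list = [{k: v} for v in vs]
--
--     # manage matrix include: include, but only if it is not already there
--     if matrix_include:
--         # dict is not hashable, so we cannot implement uniqueness via list(set())
--         # we first remove exact dupes, and then insert
--         for include_item in matrix_include:
--             matrix_list = [item for item in matrix_list if item != include_item]
--         matrix_list.extend(matrix_include)
--     excluded_items = []
--
--     # manage matrix exclude
--     if matrix_exclude:
--         for exclude_items in matrix_exclude:
--             for item in matrix_list:
--                 # exclude works if all of exclude items keys are inside an item remove them.
--                 # all item keys do not need to be in exclude item
--                 for k, v in exclude_items.items():
--                     if k not in item or item[k] != v: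
--                         break
--                 else:
--                     excluded_items.append(item)
--     if excluded_items:
--         matrix_list = [item for item in matrix_list if item not in excluded_items]
--     return matrix_list
-- ===== SOURCE B (Python) =====
-- def compute_matrix(matrix, matrix_include=None, matrix_exclude=None):
--     include = list(matrix_include) if matrix_include else []
--     exclude = list(matrix_exclude) if matrix_exclude else []
--     if not matrix and not include:
--         return [{}]
--     # Enumerate the cartesian product arithmetically: each row index i is decoded
--     # in mixed radix (rightmost key varies fastest) instead of building the product
--     # dimension by dimension.
--     rows = []
--     if matrix:
--         total = 1
--         strides_rev = []
--         for n in reversed([len(vs) for vs in matrix.values()]):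
--             strides_rev.append(total)
--             total *= n
--         strides = list(reversed(strides_rev))
--         for i in range(total):
--             rows.append({k: vs[(i // s) % len(vs)]
--                          for (k, vs), s in zip(matrix.items(), strides)})
--     # de-duplicate against the includes with a hash set of frozen item sets
--     include_sets = {frozenset(d.items()) for d in include}
--     out = [item for item in rows if frozenset(item.items()) not in include_sets]
--     out.extend(include)
--     # drop every item some exclude spec matches
--     return [item for item in out
--             if not any(all(item.get(k) == v for k, v in ex.items()) for ex in exclude)]
-- ===== Notes on version B (the rewrite author's own statement) =====
-- stated objective: alternative
-- what changed: Replaces A's dimension-by-dimension fold that materialises intermediate row lists by arithmetic mixed-radix decoding (row i is decoded from a flat index via precomputed strides, so no intermediate lists exist), replaces the per-include-item filtering passes by one membership test against a hash set of frozenset(item.items()), and fuses A's collect-excluded-then-remove two-phase exclude into one any-spec-matches predicate filter.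
-- intended difference: On matrices where some key has an empty value list but the last key's list is non-empty, A's accumulator resets and it returns the cartesian product of only the keys after the last empty-valued one (on the diff witness A returns one item where B returns none), while B returns the empty product, the intended matrix semantics: a dimension with no values yields no combinations. — e.g. on compute_matrix([("a", []), ("b", ["x"])], none, none): A returns [[("b", "x")]], B returns []
import Mathlib
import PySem

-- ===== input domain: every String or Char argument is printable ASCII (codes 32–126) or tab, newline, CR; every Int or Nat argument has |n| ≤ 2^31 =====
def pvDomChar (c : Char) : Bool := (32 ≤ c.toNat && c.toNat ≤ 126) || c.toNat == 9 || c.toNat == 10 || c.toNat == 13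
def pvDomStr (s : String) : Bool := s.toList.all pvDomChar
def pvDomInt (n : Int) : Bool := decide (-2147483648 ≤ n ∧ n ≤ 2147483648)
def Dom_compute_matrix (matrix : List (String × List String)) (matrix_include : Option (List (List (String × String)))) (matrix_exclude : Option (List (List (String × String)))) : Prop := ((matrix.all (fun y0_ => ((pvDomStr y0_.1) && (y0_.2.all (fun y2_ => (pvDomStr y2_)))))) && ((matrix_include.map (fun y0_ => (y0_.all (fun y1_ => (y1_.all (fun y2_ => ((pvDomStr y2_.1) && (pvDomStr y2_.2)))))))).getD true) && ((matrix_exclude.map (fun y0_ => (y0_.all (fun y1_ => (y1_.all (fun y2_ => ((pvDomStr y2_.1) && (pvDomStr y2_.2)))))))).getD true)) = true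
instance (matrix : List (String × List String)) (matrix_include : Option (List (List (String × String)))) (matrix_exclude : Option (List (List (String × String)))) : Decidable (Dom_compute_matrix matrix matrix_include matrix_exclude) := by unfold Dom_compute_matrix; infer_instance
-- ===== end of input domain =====

-- B replaces A's dimension-by-dimension fold by arithmetic mixed-radix decoding of a flat
-- row index (no intermediate lists), a hash-set style frozenset membership test for the
-- include dedup, and one predicate filter for the exclude phase; on matrices with an empty
-- value list followed by a non-empty one A's fold resets and B intentionally differs (see D_).

-- ===== PORT A =====
-- Shared Python-semantics helpers (dict `==`, dict lookup, the exclude-spec test;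
-- exact for dicts, whose keys are unique — cf. Pre_):
-- Python's `d1 == d2` on dicts ignores insertion order: same keys, same values.
def pyDictEq (d1 d2 : List (String × String)) : Bool :=
  d1.all (fun p => d2.lookup p.1 == some p.2) && d2.all (fun p => d1.lookup p.1 == some p.2)

-- A's `for k, v in exclude_items.items(): if k not in item or item[k] != v: break / else:`
-- succeeds iff every (k, v) of ex is bound in item; B's `all(item.get(k) == v ...)` is the same test.
def pyMatch (ex item : List (String × String)) : Bool :=
  ex.all (fun p => item.lookup p.1 == some p.2)

-- `_matrix_item[k] = v` : dict __setitem__ — overwrite in place, else append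
def pyInsert (d : List (String × String)) (k v : String) : List (String × String) :=
  if d.any (fun p => p.1 == k) then d.map (fun p => if p.1 == k then (k, v) else p)
  else d ++ [(k, v)]

-- one iteration of A's `for k, vs in matrix.items()` loop
def stepA (ml : List (List (String × String))) (kv : String × List String) :
    List (List (String × String)) :=
  if !ml.isEmpty then
    ml.foldl (fun next item =>
      kv.2.foldl (fun next2 v => next2 ++ [pyInsert item kv.1 v]) next) []
  else kv.2.map (fun v => [(kv.1, v)])

def compute_matrix (matrix : List (String × List String)) (matrix_include : Option (List (List (String × String)))) (matrix_exclude : Option (List (List (String × String)))) : List (List (String × String)) :=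
  if matrix.isEmpty && (matrix_include.getD []).isEmpty then [[]]
  else
    let ml1 := matrix.foldl stepA []
    let ml2 :=
      match matrix_include with
      | none => ml1
      | some inc =>
        if !inc.isEmpty then
          (inc.foldl (fun ml incItem => ml.filter (fun item => !pyDictEq item incItem)) ml1) ++ inc
        else ml1
    let excluded :=
      match matrix_exclude with
      | none => ([] : List (List (String × String)))
      | some exc =>
        if !exc.isEmpty then
          exc.foldl (fun acc ex =>
            ml2.foldl (fun acc2 item => if pyMatch ex item then acc2 ++ [item] else acc2) acc) []
        else []
    if !excluded.isEmpty then
      ml2.filter (fun item => !excluded.any (fun e => pyDictEq item e))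
    else ml2

-- ===== PORT B =====
-- `frozenset(a.items()) == frozenset(b.items())`: same set of (key, value) pairs
def fsEq (a b : List (String × String)) : Bool :=
  a.all (fun p => b.contains p) && b.all (fun p => a.contains p)

def compute_matrix_alt (matrix : List (String × List String)) (matrix_include : Option (List (List (String × String)))) (matrix_exclude : Option (List (List (String × String)))) : List (List (String × String)) :=
  let include_ := matrix_include.getD []   -- `list(matrix_include) if matrix_include else []`
  let exclude_ := matrix_exclude.getD []
  if matrix.isEmpty && include_.isEmpty then [[]]
  else
    let rows :=
      if !matrix.isEmpty then
        -- total, strides_rev accumulated over reversed([len(vs) ...]); strides = reversed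
        let ts := (matrix.map (fun p => p.2.length)).reverse.foldl
            (fun (acc : Nat × List Nat) n => (acc.1 * n, acc.2 ++ [acc.1])) (1, [])
        let strides := ts.2.reverse
        -- row i decoded in mixed radix; vs[(i // s) % len(vs)] is always in range (getD exact)
        (List.range ts.1).map (fun i =>
          (matrix.zip strides).map (fun q => (q.1.1, q.1.2.getD ((i / q.2) % q.1.2.length) "")))
      else []
    -- `frozenset(item.items()) not in include_sets`
    let out := rows.filter (fun item => !include_.any (fun inc => fsEq item inc)) ++ include_
    out.filter (fun item => !exclude_.any (fun ex => pyMatch ex item))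

-- ===== PRECONDITION & SPEC =====
-- Pre_ only states the dict well-formedness the Python types guarantee: the matrix's keys
-- and each include item's keys are distinct (a Python dict cannot carry duplicate keys).
def Pre_compute_matrix (matrix : List (String × List String)) (matrix_include : Option (List (List (String × String)))) (matrix_exclude : Option (List (List (String × String)))) : Prop :=
  (matrix.map Prod.fst).Nodup ∧ ∀ inc ∈ matrix_include.getD [], (inc.map Prod.fst).Nodup
instance (matrix : List (String × List String)) (matrix_include : Option (List (List (String × String)))) (matrix_exclude : Option (List (List (String × String)))) : Decidable (Pre_compute_matrix matrix matrix_include matrix_exclude) := by unfold Pre_compute_matrix; infer_instance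

def pvWitness_compute_matrix : (List (String × List String)) × (Option (List (List (String × String)))) × (Option (List (List (String × String)))) :=
  ([("a", ["1", "2"]), ("b", ["3"])], some [[("b", "3"), ("a", "9")]], some [[("a", "1")]])

-- On matrices where some key has an empty value list but the last key's list is non-empty,
-- A's accumulator resets and it returns the product of only the keys after the last empty
-- one (e.g. {'a': [], 'b': ['x']} ↦ [{'b': 'x'}]), while B returns the empty product [],
-- the intended matrix semantics: a dimension with no values yields no combinations.
def D_compute_matrix (matrix : List (String × List String)) (matrix_include : Option (List (List (String × String)))) (matrix_exclude : Option (List (List (String × String)))) : Prop :=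
  (matrix.any (fun p => p.2.isEmpty) && (matrix.getLast?.elim false (fun p => !p.2.isEmpty))) = true
instance (matrix : List (String × List String)) (matrix_include : Option (List (List (String × String)))) (matrix_exclude : Option (List (List (String × String)))) : Decidable (D_compute_matrix matrix matrix_include matrix_exclude) := by unfold D_compute_matrix; infer_instance

def Spec_compute_matrix (matrix : List (String × List String)) (matrix_include : Option (List (List (String × String)))) (matrix_exclude : Option (List (List (String × String)))) (out : List (List (String × String))) : Prop :=
  ¬ D_compute_matrix matrix matrix_include matrix_exclude → out = compute_matrix_alt matrix matrix_include matrix_exclude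
instance (matrix : List (String × List String)) (matrix_include : Option (List (List (String × String)))) (matrix_exclude : Option (List (List (String × String)))) (out : List (List (String × String))) : Decidable (Spec_compute_matrix matrix matrix_include matrix_exclude out) := by unfold Spec_compute_matrix; infer_instance

def pvDiffWitness_compute_matrix : (List (String × List String)) × (Option (List (List (String × String)))) × (Option (List (List (String × String)))) :=
  ([("a", []), ("b", ["x"])], none, none)
def pvDiffWitnessOut_compute_matrix : (List (List (String × String))) × (List (List (String × String))) :=
  ([[("b", "x")]], [])

-- ===== CLAIM (what is proved, stated in full; the proofs are below) =====
def Claim_unchanged_compute_matrix : Prop := ∀ (matrix : List (String × List String)) (matrix_include : Option (List (List (String × String)))) (matrix_exclude : Option (List (List (String × String)))), Dom_compute_matrix matrix matrix_include matrix_exclude → Pre_compute_matrix matrix matrix_include matrix_exclude → Spec_compute_matrix matrix matrix_include matrix_exclude (compute_matrix matrix matrix_include matrix_exclude)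
def Claim_changed_compute_matrix : Prop := Dom_compute_matrix (pvDiffWitness_compute_matrix.1) (pvDiffWitness_compute_matrix.2.1) (pvDiffWitness_compute_matrix.2.2) ∧ Pre_compute_matrix (pvDiffWitness_compute_matrix.1) (pvDiffWitness_compute_matrix.2.1) (pvDiffWitness_compute_matrix.2.2) ∧ D_compute_matrix (pvDiffWitness_compute_matrix.1) (pvDiffWitness_compute_matrix.2.1) (pvDiffWitness_compute_matrix.2.2) ∧ compute_matrix (pvDiffWitness_compute_matrix.1) (pvDiffWitness_compute_matrix.2.1) (pvDiffWitness_compute_matrix.2.2) = pvDiffWitnessOut_compute_matrix.1 ∧ compute_matrix_alt (pvDiffWitness_compute_matrix.1) (pvDiffWitness_compute_matrix.2.1) (pvDiffWitness_compute_matrix.2.2) = pvDiffWitnessOut_compute_matrix.2 ∧ pvDiffWitnessOut_compute_matrix.1 ≠ pvDiffWitnessOut_compute_matrix.2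

-- ===== LEMMAS AND PROOFS =====

theorem lookup_some_mem {d : List (String × String)} {k v : String}
    (h : d.lookup k = some v) : (k, v) ∈ d := by
  rcases List.lookup_eq_some_iff.mp h with ⟨l₁, l₂, rfl, -⟩
  simp

theorem mem_lookup {d : List (String × String)} {k v : String}
    (hnd : (d.map Prod.fst).Nodup) (hm : (k, v) ∈ d) : d.lookup k = some v := by
  induction d with
  | nil => simp at hm
  | cons p t ih =>
    simp only [List.map_cons, List.nodup_cons] at hnd
    rcases List.mem_cons.mp hm with h | h
    · subst h; simp [List.lookup]
    · have he : ¬ p.1 = k := by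
        intro he
        exact hnd.1 (he ▸ List.mem_map.mpr ⟨(k, v), h, rfl⟩)
      have hbe : (k == p.1) = false := by simp [Ne.symm he]
      simpa [List.lookup, hbe] using ih hnd.2 h

theorem pyDictEq_lookup {d1 d2 : List (String × String)}
    (h : pyDictEq d1 d2 = true) (k : String) : d1.lookup k = d2.lookup k := by
  simp only [pyDictEq, Bool.and_eq_true, List.all_eq_true, beq_iff_eq] at h
  obtain ⟨h1, h2⟩ := h
  cases hc : d1.lookup k with
  | some v => exact (h1 (k, v) (lookup_some_mem hc)).symm
  | none =>
    cases hc2 : d2.lookup k with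
    | none => rfl
    | some w => exact absurd (h2 (k, w) (lookup_some_mem hc2)) (by simp [hc])

theorem pyDictEq_refl {d : List (String × String)}
    (hnd : (d.map Prod.fst).Nodup) : pyDictEq d d = true := by
  simp only [pyDictEq, Bool.and_eq_true, List.all_eq_true, beq_iff_eq]
  refine ⟨?_, ?_⟩ <;>
    · rintro ⟨a, b⟩ hp
      exact mem_lookup hnd hp

theorem pyMatch_congr {it e ex : List (String × String)}
    (hde : pyDictEq it e = true) (hm : pyMatch ex e = true) : pyMatch ex it = true := by
  simp only [pyMatch, List.all_eq_true, beq_iff_eq] at *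
  intro p hp
  rw [pyDictEq_lookup hde p.1]
  exact hm p hp

-- B's frozenset equality coincides with dict equality when both sides have distinct keys
theorem fsEq_eq_pyDictEq {a b : List (String × String)}
    (ha : (a.map Prod.fst).Nodup) (hb : (b.map Prod.fst).Nodup) :
    fsEq a b = pyDictEq a b := by
  have h : ∀ (x y : List (String × String)), (y.map Prod.fst).Nodup →
      x.all (fun p => y.contains p) = x.all (fun p => y.lookup p.1 == some p.2) := by
    intro x y hy
    rw [Bool.eq_iff_iff]
    simp only [List.all_eq_true, beq_iff_eq]
    constructor
    · rintro hall ⟨k, v⟩ hp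
      exact mem_lookup hy (by simpa using hall _ hp)
    · rintro hall ⟨k, v⟩ hp
      simpa using lookup_some_mem (hall _ hp)
  simp only [fsEq, pyDictEq]
  rw [h a b hb, h b a ha]

-- A's repeated per-include-item dedup filters are one filter over `all`
theorem foldl_filter_all {α β : Type} (inc : List α) (p : α → β → Bool) :
    ∀ base : List β,
      inc.foldl (fun ml i => ml.filter (fun it => !p i it)) base
        = base.filter (fun it => inc.all (fun i => !p i it)) := by
  induction inc with
  | nil => intro base; simp
  | cons i is ih =>
    intro base
    simp only [List.foldl_cons, ih, List.filter_filter]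
    exact List.filter_congr (fun x _ => by simp [List.all_cons, Bool.and_comm])

-- A's excluded_items collection loop is a flatMap of filters
theorem excluded_eq (exc L : List (List (String × String))) :
    ∀ acc,
      exc.foldl (fun acc ex =>
          L.foldl (fun a it => if pyMatch ex it then a ++ [it] else a) acc) acc
        = acc ++ exc.flatMap (fun ex => L.filter (fun it => pyMatch ex it)) := by
  intro acc
  calc exc.foldl (fun acc ex =>
          L.foldl (fun a it => if pyMatch ex it then a ++ [it] else a) acc) acc
      = exc.foldl (fun acc ex => acc ++ L.filter (fun it => pyMatch ex it)) acc :=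
        PySem.List.foldl_congr_mem _ _ _ _
          (fun a x _ => PySem.List.foldl_append_if_eq_filter _ _ _)
    _ = acc ++ exc.flatMap (fun ex => L.filter (fun it => pyMatch ex it)) :=
        PySem.List.foldl_append_eq_flatMap _ _ _

theorem stepA_of_ne_nil {ml : List (List (String × String))} (h : ml ≠ [])
    (kv : String × List String) :
    stepA ml kv = ml.flatMap (fun item => kv.2.map (fun v => pyInsert item kv.1 v)) := by
  unfold stepA
  rw [if_pos (by simp [h])]
  calc ml.foldl (fun next item =>
          kv.2.foldl (fun next2 v => next2 ++ [pyInsert item kv.1 v]) next) []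
      = ml.foldl (fun next item => next ++ kv.2.map (fun v => pyInsert item kv.1 v)) [] :=
        PySem.List.foldl_congr_mem _ _ _ _
          (fun acc x _ => PySem.List.foldl_append_singleton_eq_map _ _ _)
    _ = [] ++ ml.flatMap (fun item => kv.2.map (fun v => pyInsert item kv.1 v)) :=
        PySem.List.foldl_append_eq_flatMap _ _ _
    _ = _ := by simp

theorem pyInsert_append {d : List (String × String)} {k v : String}
    (h : k ∉ d.map Prod.fst) : pyInsert d k v = d ++ [(k, v)] := by
  have hc : (d.any (fun p => p.1 == k)) = false := by
    rw [List.any_eq_false]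
    intro p hp he
    exact h (eq_of_beq he ▸ List.mem_map.mpr ⟨p, hp, rfl⟩)
  simp [pyInsert, hc]

-- ---- the strides fold of B ----
def sfold (lr : List Nat) (t : Nat) (s : List Nat) : Nat × List Nat :=
  lr.foldl (fun acc n => (acc.1 * n, acc.2 ++ [acc.1])) (t, s)

theorem sfold_shift (lr : List Nat) (t : Nat) (s : List Nat) :
    sfold lr t s = (t * (sfold lr 1 []).1, s ++ ((sfold lr 1 []).2).map (t * ·)) := by
  induction lr generalizing t s with
  | nil => simp [sfold]
  | cons n lr ih =>
    show sfold lr (t * n) (s ++ [t]) = _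
    rw [ih (t * n) (s ++ [t])]
    have h2 : sfold (n :: lr) 1 [] = sfold lr n [1] := by simp [sfold]
    rw [h2, ih n [1]]
    simp [List.map_map, Function.comp_def]
    exact ⟨by ring, fun a _ => by ring⟩

theorem sfold_fst (lr : List Nat) : (sfold lr 1 []).1 = lr.prod := by
  induction lr with
  | nil => simp [sfold]
  | cons n lr ih =>
    have h2 : sfold (n :: lr) 1 [] = sfold lr n [1] := by simp [sfold]
    rw [h2, sfold_shift lr n [1], List.prod_cons]
    simp [ih]

theorem sfold_len (lr : List Nat) : (sfold lr 1 []).2.length = lr.length := by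
  induction lr with
  | nil => simp [sfold]
  | cons n lr ih =>
    have h2 : sfold (n :: lr) 1 [] = sfold lr n [1] := by simp [sfold]
    rw [h2, sfold_shift lr n [1]]
    simp [ih]

-- (range vs.length).map getD recovers vs
theorem map_range_getD (vs : List String) :
    (List.range vs.length).map (fun r => vs.getD r "") = vs := by
  induction vs with
  | nil => simp
  | cons v t ih =>
    rw [List.length_cons, List.range_succ_eq_map]
    simp only [List.map_cons, List.map_map, Function.comp_def]
    simp only [List.getD_cons_zero, List.getD_cons_succ]
    rw [ih]

-- flat range over a product decomposes into nested ranges (mixed-radix)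
theorem range_mul_flatMap {β : Type} (w : Nat) (f : Nat → β) :
    ∀ T, (List.range (T * w)).map f
      = (List.range T).flatMap (fun q => (List.range w).map (fun r => f (q * w + r))) := by
  intro T
  induction T with
  | zero => simp
  | succ T ih =>
    rw [Nat.succ_mul, List.range_add, List.map_append, ih, List.range_succ,
      List.flatMap_append]
    simp [List.map_map, Function.comp_def]

-- rows of B for matrix m (the decoded mixed-radix table)
def rowsB (m : List (String × List String)) : List (List (String × String)) :=
  (List.range (sfold (m.map (fun p => p.2.length)).reverse 1 []).1).map (fun i =>
    (m.zip ((sfold (m.map (fun p => p.2.length)).reverse 1 []).2.reverse)).map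
      (fun q => (q.1.1, q.1.2.getD ((i / q.2) % q.1.2.length) "")))

theorem rowsB_concat (m : List (String × List String)) (k : String) (vs : List String)
    (hw : vs ≠ []) :
    rowsB (m ++ [(k, vs)])
      = (rowsB m).flatMap (fun item => vs.map (fun v => item ++ [(k, v)])) := by
  have hw0 : 0 < vs.length := List.length_pos_iff.mpr hw
  unfold rowsB
  have hlens : ((m ++ [(k, vs)]).map (fun p => p.2.length)).reverse
      = vs.length :: (m.map (fun p => p.2.length)).reverse := by simp
  rw [hlens]
  set G := sfold (m.map (fun p => p.2.length)).reverse 1 [] with hG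
  have hstep : sfold (vs.length :: (m.map (fun p => p.2.length)).reverse) 1 []
      = (vs.length * G.1, [1] ++ G.2.map (vs.length * ·)) := by
    have h2 : sfold (vs.length :: (m.map (fun p => p.2.length)).reverse) 1 []
        = sfold (m.map (fun p => p.2.length)).reverse vs.length [1] := by simp [sfold]
    rw [h2, sfold_shift]
  rw [hstep]
  have hGlen : G.2.length = m.length := by
    rw [hG, sfold_len]; simp
  have hzip : ∀ i : Nat,
      ((m ++ [(k, vs)]).zip (([1] ++ G.2.map (vs.length * ·)).reverse)).map
        (fun q => (q.1.1, q.1.2.getD ((i / q.2) % q.1.2.length) ""))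
      = (m.zip G.2.reverse).map
          (fun q => (q.1.1, q.1.2.getD (((i / vs.length) / q.2) % q.1.2.length) ""))
        ++ [(k, vs.getD (i % vs.length) "")] := by
    intro i
    have hrev : ([1] ++ G.2.map (vs.length * ·)).reverse
        = (G.2.map (vs.length * ·)).reverse ++ [1] := by simp
    rw [hrev, List.zip_append (by simp [hGlen]), List.map_append]
    congr 1
    · rw [← List.map_reverse, List.zip_map_right, List.map_map]
      apply List.map_congr_left
      rintro ⟨⟨k', vs'⟩, s⟩ _
      simp only [Function.comp_def, Prod.map]
      rw [Nat.div_div_eq_div_mul, mul_comm]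
      simp
    · simp [hw0, Nat.mod_eq_of_lt]
  calc (List.range (vs.length * G.1)).map (fun i =>
          ((m ++ [(k, vs)]).zip (([1] ++ G.2.map (vs.length * ·)).reverse)).map
            (fun q => (q.1.1, q.1.2.getD ((i / q.2) % q.1.2.length) "")))
      = (List.range (G.1 * vs.length)).map (fun i =>
          (m.zip G.2.reverse).map
            (fun q => (q.1.1, q.1.2.getD (((i / vs.length) / q.2) % q.1.2.length) ""))
          ++ [(k, vs.getD (i % vs.length) "")]) := by
        rw [mul_comm]
        exact List.map_congr_left (fun i _ => hzip i)
    _ = (List.range G.1).flatMap (fun q => (List.range vs.length).map (fun r =>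
          (m.zip G.2.reverse).map
            (fun p => (p.1.1, p.1.2.getD ((((q * vs.length + r) / vs.length) / p.2) % p.1.2.length) ""))
          ++ [(k, vs.getD ((q * vs.length + r) % vs.length) "")])) :=
        range_mul_flatMap vs.length _ G.1
    _ = _ := by
        rw [List.flatMap_map]
        apply List.flatMap_congr
        intro q _
        have hmap : ∀ r ∈ List.range vs.length,
            (m.zip G.2.reverse).map
              (fun p => (p.1.1, p.1.2.getD ((((q * vs.length + r) / vs.length) / p.2) % p.1.2.length) ""))
            ++ [(k, vs.getD ((q * vs.length + r) % vs.length) "")]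
            = (m.zip G.2.reverse).map
                (fun p => (p.1.1, p.1.2.getD ((q / p.2) % p.1.2.length) ""))
              ++ [(k, vs.getD r "")] := by
          intro r hr
          have hrw : r < vs.length := List.mem_range.mp hr
          have hdiv : (q * vs.length + r) / vs.length = q := by
            rw [mul_comm q vs.length, Nat.mul_add_div hw0, Nat.div_eq_of_lt hrw, Nat.add_zero]
          have hmod : (q * vs.length + r) % vs.length = r := by
            rw [mul_comm q vs.length, Nat.mul_add_mod, Nat.mod_eq_of_lt hrw]
          rw [hdiv, hmod]
        rw [List.map_congr_left hmap]
        rw [show (fun r => (m.zip G.2.reverse).map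
              (fun p => (p.1.1, p.1.2.getD ((q / p.2) % p.1.2.length) "")) ++ [(k, vs.getD r "")])
            = (fun v => (m.zip G.2.reverse).map
              (fun p => (p.1.1, p.1.2.getD ((q / p.2) % p.1.2.length) "")) ++ [(k, v)]) ∘ (fun r => vs.getD r "")
          from rfl]
        rw [← List.map_map, map_range_getD]

theorem rowsB_single (k : String) (vs : List String) :
    rowsB [(k, vs)] = vs.map (fun v => [(k, v)]) := by
  unfold rowsB
  have h1 : sfold ([(k, vs)].map (fun p => p.2.length)).reverse 1 [] = (vs.length, [1]) := by
    simp [sfold]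
  rw [h1]
  show (List.range vs.length).map (fun i =>
      ([(k, vs)].zip [1]).map (fun q => (q.1.1, q.1.2.getD ((i / q.2) % q.1.2.length) "")))
    = vs.map (fun v => [(k, v)])
  have : ∀ i ∈ List.range vs.length,
      ([(k, vs)].zip [1]).map (fun q => (q.1.1, q.1.2.getD ((i / q.2) % q.1.2.length) ""))
      = [(k, vs.getD i "")] := by
    intro i hi
    have := List.mem_range.mp hi
    simp [Nat.mod_eq_of_lt this]
  rw [List.map_congr_left this]
  rw [show (fun i => [(k, vs.getD i "")]) = (fun v => [(k, v)]) ∘ (fun i => vs.getD i "") from rfl]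
  rw [← List.map_map, map_range_getD]

theorem rowsB_ne_nil {m : List (String × List String)}
    (h : ∀ p ∈ m, p.2 ≠ []) : rowsB m ≠ [] := by
  unfold rowsB
  rw [Ne, List.map_eq_nil_iff, List.range_eq_nil, sfold_fst, List.prod_eq_zero_iff]
  intro hc
  rw [List.mem_reverse, List.mem_map] at hc
  obtain ⟨p, hp, hp0⟩ := hc
  exact h p hp (List.eq_nil_of_length_eq_zero hp0)

theorem foldA_eq_rowsB (m : List (String × List String)) (hm : m ≠ [])
    (hnd : (m.map Prod.fst).Nodup) (hne : ∀ p ∈ m, p.2 ≠ []) :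
    m.foldl stepA [] = rowsB m := by
  induction m using List.reverseRecOn with
  | nil => exact absurd rfl hm
  | append_singleton m kv ih =>
    obtain ⟨k, vs⟩ := kv
    have hvs : vs ≠ [] := hne (k, vs) (by simp)
    rcases eq_or_ne m [] with rfl | hm'
    · simp only [List.nil_append, List.foldl_cons, List.foldl_nil]
      rw [rowsB_single]
      simp [stepA]
    · have hnd' : (m.map Prod.fst).Nodup := by
        rw [List.map_append] at hnd; exact hnd.of_append_left
      have hfresh : k ∉ m.map Prod.fst := by
        rw [List.map_append, List.nodup_append] at hnd
        intro hmem
        exact hnd.2.2 k hmem k (by simp) rfl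
      have hne' : ∀ p ∈ m, p.2 ≠ [] := fun p hp => hne p (List.mem_append_left _ hp)
      have hrec := ih hm' hnd' hne'
      rw [List.foldl_append, List.foldl_cons, List.foldl_nil, hrec,
        stepA_of_ne_nil (rowsB_ne_nil hne'), rowsB_concat m k vs hvs]
      apply List.flatMap_congr
      intro item hitem
      apply List.map_congr_left
      intro v _
      apply pyInsert_append
      -- item's keys are m's keys: item = (m.zip strides).map (first components)
      unfold rowsB at hitem
      rw [List.mem_map] at hitem
      obtain ⟨i, -, rfl⟩ := hitem
      rw [List.map_map]
      intro hc
      rw [List.mem_map] at hc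
      obtain ⟨q, hq, hq1⟩ := hc
      exact hfresh (List.mem_map.mpr ⟨q.1, (List.of_mem_zip hq).1, hq1⟩)

-- A's collect-then-remove exclude phase is B's single any-match filter
theorem exclude_eq (L exc : List (List (String × String)))
    (hL : ∀ it ∈ L, (it.map Prod.fst).Nodup) :
    (if !(exc.flatMap (fun ex => L.filter (fun it => pyMatch ex it))).isEmpty then
      L.filter (fun it =>
        !(exc.flatMap (fun ex => L.filter (fun it => pyMatch ex it))).any
          (fun e => pyDictEq it e))
    else L)
      = L.filter (fun it => !exc.any (fun ex => pyMatch ex it)) := by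
  have key : ∀ it ∈ L,
      (exc.flatMap (fun ex => L.filter (fun it => pyMatch ex it))).any (fun e => pyDictEq it e)
        = exc.any (fun ex => pyMatch ex it) := by
    intro it hit
    rw [Bool.eq_iff_iff]
    simp only [List.any_eq_true, List.mem_flatMap, List.mem_filter]
    constructor
    · rintro ⟨e, ⟨ex, hex, he, hme⟩, hde⟩
      exact ⟨ex, hex, pyMatch_congr hde hme⟩
    · rintro ⟨ex, hex, hm⟩
      exact ⟨it, ⟨ex, hex, hit, hm⟩, pyDictEq_refl (hL it hit)⟩
  by_cases hemp : (exc.flatMap (fun ex => L.filter (fun it => pyMatch ex it))) = []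
  · rw [hemp]
    simp only [List.isEmpty_nil, Bool.not_true, if_false, Bool.false_eq_true]
    symm
    rw [List.filter_eq_self]
    intro it hit
    rw [Bool.not_eq_true']
    rw [← key it hit, hemp]
    simp
  · rw [if_pos (by simp [hemp])]
    exact List.filter_congr (fun it hit => by rw [key it hit])


theorem foldA_last_nil (m : List (String × List String)) (k : String) :
    (m ++ [(k, ([] : List String))]).foldl stepA [] = [] := by
  rw [List.foldl_append, List.foldl_cons, List.foldl_nil]
  rcases eq_or_ne (m.foldl stepA []) [] with h | h
  · rw [h]; simp [stepA]
  · rw [stepA_of_ne_nil h]; simp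

theorem rowsB_last_nil (m : List (String × List String)) (k : String) :
    rowsB (m ++ [(k, ([] : List String))]) = [] := by
  unfold rowsB
  have h0 : (sfold ((m ++ [(k, ([] : List String))]).map (fun p => p.2.length)).reverse 1 []).1 = 0 := by
    rw [sfold_fst]
    apply List.prod_eq_zero
    simp
  rw [h0]
  simp

theorem rowsB_keys_nodup (m : List (String × List String))
    (hnd : (m.map Prod.fst).Nodup) :
    ∀ it ∈ rowsB m, (it.map Prod.fst).Nodup := by
  intro it hit
  unfold rowsB at hit
  rw [List.mem_map] at hit
  obtain ⟨i, -, rfl⟩ := hit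
  rw [List.map_map]
  have hlen : m.length ≤ ((sfold (m.map (fun p => p.2.length)).reverse 1 []).2.reverse).length := by
    rw [List.length_reverse, sfold_len, List.length_reverse, List.length_map]
  have hkeys : (m.zip ((sfold (m.map (fun p => p.2.length)).reverse 1 []).2.reverse)).map
      (Prod.fst ∘ (fun q => (q.1.1, q.1.2.getD ((i / q.2) % q.1.2.length) "")))
      = m.map Prod.fst := by
    have : (Prod.fst ∘ (fun (q : (String × List String) × Nat) =>
        (q.1.1, q.1.2.getD ((i / q.2) % q.1.2.length) ""))) = (Prod.fst ∘ Prod.fst) := rfl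
    rw [this, ← List.map_map, List.map_fst_zip hlen]
  rw [hkeys]
  exact hnd

-- pointwise-congruent not-any is all-not
theorem not_any_eq_all_not {α : Type} (l : List α) (p q : α → Bool)
    (h : ∀ a ∈ l, p a = q a) : (!l.any p) = l.all (fun a => !q a) := by
  induction l with
  | nil => simp
  | cons a t ih =>
    simp [h a (List.mem_cons_self), ih (fun b hb => h b (List.mem_cons_of_mem _ hb)),
      Bool.not_or]

-- B's value written with rowsB and explicit filters
theorem altB_eq (m : List (String × List String))
    (minc mexc : Option (List (List (String × String)))) :
    compute_matrix_alt m minc mexc =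
      (if m.isEmpty && (minc.getD []).isEmpty then [[]]
       else ((if m.isEmpty then [] else rowsB m).filter
               (fun item => !(minc.getD []).any (fun i => fsEq item i)) ++ minc.getD []).filter
              (fun item => !(mexc.getD []).any (fun ex => pyMatch ex item))) := by
  unfold compute_matrix_alt rowsB sfold
  by_cases hm : m.isEmpty <;> simp [hm]

theorem items_nodup_keys (m : List (String × List String))
    (hnd : (m.map Prod.fst).Nodup) (q : List (String × String) → Bool)
    (inc_list : List (List (String × String)))
    (hinc : ∀ i ∈ inc_list, (i.map Prod.fst).Nodup) :
    ∀ it ∈ ((if m.isEmpty then [] else rowsB m).filter q ++ inc_list),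
      (it.map Prod.fst).Nodup := by
  intro it hit
  rcases List.mem_append.mp hit with h | h
  · have h' := (List.mem_filter.mp h).1
    split at h'
    · simp at h'
    · exact rowsB_keys_nodup m hnd it h'
  · exact hinc it h

-- the include-dedup + exclude phases of A coincide with the canonical filters on any base
theorem phases_eq (bb inc exc : List (List (String × String)))
    (hL : ∀ it ∈ bb.filter (fun item => inc.all (fun i => !pyDictEq item i)) ++ inc,
      (it.map Prod.fst).Nodup) :
    (if !(if !exc.isEmpty then
            exc.foldl (fun acc ex =>
              (if !inc.isEmpty then
                  (inc.foldl (fun ml incItem =>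
                    ml.filter (fun item => !pyDictEq item incItem)) bb) ++ inc
                else bb).foldl
                (fun acc2 item => if pyMatch ex item then acc2 ++ [item] else acc2) acc) []
          else []).isEmpty then
      (if !inc.isEmpty then
          (inc.foldl (fun ml incItem =>
            ml.filter (fun item => !pyDictEq item incItem)) bb) ++ inc
        else bb).filter
        (fun item =>
          !(if !exc.isEmpty then
              exc.foldl (fun acc ex =>
                (if !inc.isEmpty then
                    (inc.foldl (fun ml incItem =>
                      ml.filter (fun item => !pyDictEq item incItem)) bb) ++ inc
                  else bb).foldl
                  (fun acc2 item => if pyMatch ex item then acc2 ++ [item] else acc2) acc) []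
            else []).any (fun e => pyDictEq item e))
    else
      (if !inc.isEmpty then
          (inc.foldl (fun ml incItem =>
            ml.filter (fun item => !pyDictEq item incItem)) bb) ++ inc
        else bb))
      = (bb.filter (fun item => inc.all (fun i => !pyDictEq item i)) ++ inc).filter
          (fun item => !exc.any (fun ex => pyMatch ex item)) := by
  have hml2 : (if !inc.isEmpty then
      (inc.foldl (fun ml incItem =>
        ml.filter (fun item => !pyDictEq item incItem)) bb) ++ inc
    else bb)
      = bb.filter (fun item => inc.all (fun i => !pyDictEq item i)) ++ inc := by
    rcases eq_or_ne inc [] with rfl | hinc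
    · simp
    · rw [if_pos (by simp [hinc]), foldl_filter_all]
  rw [hml2]
  rcases eq_or_ne exc [] with rfl | hexc
  · simp only [List.isEmpty_nil, Bool.not_true, Bool.false_eq_true, if_false,
      List.any_nil, Bool.not_false]
    symm
    rw [List.filter_eq_self]
    intro it _
    simp
  · set L := bb.filter (fun item => inc.all (fun i => !pyDictEq item i)) ++ inc with hLdef
    have hexcl : (if !exc.isEmpty then
          exc.foldl (fun acc ex =>
            L.foldl (fun acc2 item => if pyMatch ex item then acc2 ++ [item] else acc2) acc) []
        else []) = exc.flatMap (fun ex => L.filter (fun it => pyMatch ex it)) := by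
      rw [if_pos (by simp [hexc]), excluded_eq, List.nil_append]
    rw [hexcl]
    exact exclude_eq L exc hL

-- ===== VERDICT (by name: the statement is the Claim_ definition above) =====
theorem compute_matrix_spec : Claim_unchanged_compute_matrix := by
  intro m minc mexc hdom hpre hnD
  obtain ⟨hndk, hincnd⟩ := hpre
  show compute_matrix m minc mexc = compute_matrix_alt m minc mexc
  -- the two base constructions agree outside D_
  have hbase : m.foldl stepA [] = (if m.isEmpty then [] else rowsB m) := by
    rcases eq_or_ne m [] with rfl | hm
    · simp
    · rw [if_neg (by simp [hm])]
      by_cases hall : ∀ p ∈ m, p.2 ≠ []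
      · exact foldA_eq_rowsB m hm hndk hall
      · rw [not_forall] at hall
        obtain ⟨p0, hall'⟩ := hall
        rw [Classical.not_imp, not_not] at hall'
        obtain ⟨hp0, hp0e⟩ := hall'
        rcases (List.eq_nil_or_concat m) with rfl | ⟨m', a, hma⟩
        · exact absurd rfl hm
        · rw [List.concat_eq_append] at hma
          subst hma
          have hany : (m' ++ [a]).any (fun p => p.2.isEmpty) = true :=
            List.any_eq_true.mpr ⟨p0, hp0, by simp [hp0e]⟩
          have hlastnil : a.2 = [] := by
            by_contra hne
            exact hnD (by
              unfold D_compute_matrix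
              simp [hany, hne])
          obtain ⟨ak, av⟩ := a
          simp only at hlastnil
          subst hlastnil
          rw [foldA_last_nil, rowsB_last_nil]
  rw [altB_eq]
  -- convert B's frozenset include filter to the dict-equality form
  have hfsfilter : ∀ inc : List (List (String × String)),
      (∀ i ∈ inc, (i.map Prod.fst).Nodup) →
      (if m.isEmpty then [] else rowsB m).filter
          (fun item => !inc.any (fun i => fsEq item i))
        = (if m.isEmpty then [] else rowsB m).filter
            (fun item => inc.all (fun i => !pyDictEq item i)) := by
    intro inc hinc
    apply List.filter_congr
    intro it hit
    have hitnd : (it.map Prod.fst).Nodup := by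
      rcases eq_or_ne m [] with rfl | hm
      · simp at hit
      · rw [if_neg (by simp [hm])] at hit
        exact rowsB_keys_nodup m hndk it hit
    exact not_any_eq_all_not inc _ _ (fun i hi => fsEq_eq_pyDictEq hitnd (hinc i hi))
  cases minc with
  | none =>
    cases mexc with
    | none =>
      simp only [compute_matrix, Option.getD_none]
      by_cases h0 : (m.isEmpty && (List.isEmpty ([] : List (List (String × String))))) = true
      · rw [if_pos h0, if_pos h0]
      · rw [if_neg h0, if_neg h0, hbase, hfsfilter [] (by intro i hi; simp at hi)]
        exact phases_eq _ [] []
          (items_nodup_keys m hndk _ [] (by intro i hi; simp at hi))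
    | some exc =>
      simp only [compute_matrix, Option.getD_none, Option.getD_some]
      by_cases h0 : (m.isEmpty && (List.isEmpty ([] : List (List (String × String))))) = true
      · rw [if_pos h0, if_pos h0]
      · rw [if_neg h0, if_neg h0, hbase, hfsfilter [] (by intro i hi; simp at hi)]
        exact phases_eq _ [] exc
          (items_nodup_keys m hndk _ [] (by intro i hi; simp at hi))
  | some inc =>
    have hincnd' : ∀ i ∈ inc, (i.map Prod.fst).Nodup := fun i hi => hincnd i hi
    cases mexc with
    | none =>
      simp only [compute_matrix, Option.getD_some, Option.getD_none]
      by_cases h0 : (m.isEmpty && inc.isEmpty) = true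
      · rw [if_pos h0, if_pos h0]
      · rw [if_neg h0, if_neg h0, hbase, hfsfilter inc hincnd']
        exact phases_eq _ inc [] (items_nodup_keys m hndk _ inc hincnd')
    | some exc =>
      simp only [compute_matrix, Option.getD_some]
      by_cases h0 : (m.isEmpty && inc.isEmpty) = true
      · rw [if_pos h0, if_pos h0]
      · rw [if_neg h0, if_neg h0, hbase, hfsfilter inc hincnd']
        exact phases_eq _ inc exc (items_nodup_keys m hndk _ inc hincnd')

theorem compute_matrix_changed : Claim_changed_compute_matrix := by
  unfold Claim_changed_compute_matrix
  decide
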